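-- pv_equiv track=rewrite | github.com/PdxCodeGuild/class_armadillo | Code/Samuel/python/op04-sock_sorter.py | count_socks
-- ===== SOURCE A (Python) =====
-- def count_socks(socks):
--     sorted_socks = dict()
--     # Loops through the list of socks
--     for i in range(len(socks)):
--         # If the socks have already been added to the dictionary,
--         # incriment their value.
--         # If they are not, the will create a new entry in the dictionary
--         # and set the default value to one.
--         if sorted_socks.get(socks[i][0] + " " + socks[i][1], False):
--             sorted_socks[socks[i][0] + " " + socks[i][1]] += 1
--         else:
--             sorted_socks.setdefault(socks[i][0] + " " + socks[i][1], 1)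
--     # Returns the sorted numbers of socks
--     return sorted_socks
-- ===== SOURCE B (Python) =====
-- def count_socks(socks):
--     keys = [sock[0] + " " + sock[1] for sock in socks]
--     return {k: keys.count(k) for k in dict.fromkeys(keys)}
-- ===== Notes on version B (the rewrite author's own statement) =====
-- stated objective: simpler
-- what changed: Replaces A's index loop with a branching get/increment-or-setdefault dict mutation by two plain passes: build the key list once, then a dict comprehension over the first-occurrence-deduplicated keys with keys.count(k) per distinct key.
import Mathlib
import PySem

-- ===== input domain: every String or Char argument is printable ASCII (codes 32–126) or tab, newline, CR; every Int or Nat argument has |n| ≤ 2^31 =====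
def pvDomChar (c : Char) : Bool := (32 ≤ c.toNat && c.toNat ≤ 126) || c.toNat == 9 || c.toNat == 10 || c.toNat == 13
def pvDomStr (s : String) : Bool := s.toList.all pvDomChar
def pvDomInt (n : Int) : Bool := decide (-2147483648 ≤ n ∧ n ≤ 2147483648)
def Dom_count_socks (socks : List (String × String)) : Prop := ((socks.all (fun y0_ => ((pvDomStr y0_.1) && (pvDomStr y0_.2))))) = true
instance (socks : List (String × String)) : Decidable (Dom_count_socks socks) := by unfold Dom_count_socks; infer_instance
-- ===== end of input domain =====

-- B replaces A's single-pass get/increment-or-setdefault dict mutation by two plain passes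
-- (key list, then count per first-occurrence-distinct key); objective: simpler, not faster.

-- ===== PORT A =====
-- literal port of A: for i in range(len(socks)): truthy get → d[key] += 1, else setdefault(key, 1)
-- pyGetD is exact here: i ranges over range(len(socks)), so socks[i] never raises
def count_socks (socks : List (String × String)) : List (String × Int) :=
  (List.foldl
    (fun d i =>
      let sock := PySem.List.pyGetD socks i ("", "")
      let key := sock.1 ++ " " ++ sock.2
      if (PySem.Dict.get? d key).getD 0 ≠ 0 then
        PySem.Dict.insert d key ((PySem.Dict.get? d key).getD 0 + 1)
      else
        PySem.Dict.setdefault d key 1)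
    PySem.Dict.empty
    (PySem.List.pyRange 0 (socks.length : Int))).items

-- ===== PORT B =====
def count_socks_alt (socks : List (String × String)) : List (String × Int) :=
  let keys := socks.map (fun sock => sock.1 ++ " " ++ sock.2)
  (PySem.List.dedup keys).map (fun k => (k, (PySem.List.count keys k : Int)))

-- ===== PRECONDITION & SPEC =====
def Spec_count_socks (socks : List (String × String)) (out : List (String × Int)) : Prop := out = count_socks_alt socks
instance (socks : List (String × String)) (out : List (String × Int)) : Decidable (Spec_count_socks socks out) := by unfold Spec_count_socks; infer_instance

-- ===== CLAIM (what is proved, stated in full; the proofs are below) =====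
def Claim_equal_count_socks : Prop := ∀ (socks : List (String × String)), Dom_count_socks socks → Spec_count_socks socks (count_socks socks)

-- ===== LEMMAS AND PROOFS =====

-- A's loop body, factored over the key string (proof-side names only)
def pvStepA (d : PySem.Dict String Int) (k : String) : PySem.Dict String Int :=
  if (PySem.Dict.get? d k).getD 0 ≠ 0 then
    PySem.Dict.insert d k ((PySem.Dict.get? d k).getD 0 + 1)
  else PySem.Dict.setdefault d k 1

def pvKey (sock : String × String) : String := sock.1 ++ " " ++ sock.2

def pvStepA' (d : PySem.Dict String Int) (sock : String × String) : PySem.Dict String Int :=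
  pvStepA d (pvKey sock)

-- a value looked up in a dict is among its values
theorem pv_get?_mem_values {κ ν : Type} [BEq κ] (d : PySem.Dict κ ν) (k : κ) (v : ν)
    (h : d.get? k = some v) : v ∈ d.values := by
  simp only [PySem.Dict.get?, Option.map_eq_some_iff] at h
  obtain ⟨p, hp, rfl⟩ := h
  exact List.mem_map_of_mem (List.mem_of_find?_eq_some hp)

-- values of an insert are the new value or old values
theorem pv_mem_values_insert {κ ν : Type} [BEq κ] (d : PySem.Dict κ ν) (k : κ) (v w : ν)
    (h : w ∈ (d.insert k v).values) : w = v ∨ w ∈ d.values := by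
  simp only [PySem.Dict.insert] at h
  split at h
  · simp only [PySem.Dict.values, List.map_map, List.mem_map, Function.comp] at h
    obtain ⟨p, hp, hw⟩ := h
    by_cases hk : (p.1 == k) = true
    · rw [if_pos hk] at hw; left; exact hw.symm
    · rw [if_neg hk] at hw; right
      exact hw ▸ List.mem_map_of_mem hp
  · simp only [PySem.Dict.values, List.map_append, List.mem_append, List.map_cons, List.map_nil,
      List.mem_cons, List.not_mem_nil, or_false] at h
    tauto

-- A's loop body equals Counter's step on any dict with positive values
theorem pv_step_eq (d : PySem.Dict String Int) (k : String)
    (hpos : ∀ v ∈ d.values, 0 < v) :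
    pvStepA d k = d.modify k 0 (· + 1) := by
  unfold pvStepA
  cases hg : d.get? k with
  | none =>
      have hc : d.contains k = false := by
        simp only [PySem.Dict.get?, Option.map_eq_none_iff, List.find?_eq_none] at hg
        simp only [PySem.Dict.contains, List.any_eq_false]
        intro p hp; exact by simpa using hg p hp
      simp only [hg, Option.getD_none, ne_eq, not_true_eq_false, if_false,
        PySem.Dict.modify, PySem.Dict.getD, PySem.Dict.setdefault, PySem.Dict.insert, hc]
      norm_num
  | some v =>
      have hv : 0 < v := hpos v (pv_get?_mem_values d k v hg)
      simp only [hg, Option.getD_some, PySem.Dict.modify, PySem.Dict.getD]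
      rw [if_pos (by omega)]

-- positivity of values is preserved by Counter's step
theorem pv_step_pos (d : PySem.Dict String Int) (k : String)
    (hpos : ∀ v ∈ d.values, 0 < v) :
    ∀ v ∈ (d.modify k 0 (· + 1)).values, 0 < v := by
  intro w hw
  have h0 : (0 : Int) ≤ d.getD k 0 := by
    cases hg : d.get? k with
    | none => simp [PySem.Dict.getD, hg]
    | some v => have := hpos v (pv_get?_mem_values d k v hg); simp [PySem.Dict.getD, hg]; omega
  simp only [PySem.Dict.modify] at hw
  rcases pv_mem_values_insert _ _ _ _ hw with h | h
  · simp only [h]; omega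
  · exact hpos w h

-- A's fold equals Counter's fold, given the positive-values invariant
theorem pv_fold_eq (keys : List String) (d : PySem.Dict String Int)
    (hpos : ∀ v ∈ d.values, 0 < v) :
    List.foldl pvStepA d keys = List.foldl (fun d k => d.modify k 0 (· + 1)) d keys := by
  induction keys generalizing d with
  | nil => rfl
  | cons k rest ih =>
      simp only [List.foldl_cons, pv_step_eq d k hpos]
      exact ih _ (pv_step_pos d k hpos)

-- A's whole loop is Counter over the key list
theorem pv_A_eq_counter (socks : List (String × String)) :
    List.foldl pvStepA' PySem.Dict.empty socks
      = PySem.Dict.counter (socks.map pvKey) := by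
  rw [PySem.Dict.counter_eq_foldl,
    ← pv_fold_eq (socks.map pvKey) PySem.Dict.empty
      (by intro v hv; simp [PySem.Dict.empty, PySem.Dict.values] at hv),
    List.foldl_map]
  rfl

-- ===== VERDICT (by name: the statement is the Claim_ definition above) =====
theorem count_socks_spec : Claim_equal_count_socks := by
  intro socks _
  unfold Spec_count_socks count_socks_alt
  have e1 : count_socks socks
      = (List.foldl (fun d i => pvStepA' d (PySem.List.pyGetD socks i ("", "")))
          PySem.Dict.empty (PySem.List.pyRange 0 (socks.length : Int))).items := rfl
  rw [e1, PySem.List.foldl_pyRange_zero_pyGetD' socks ("", "") pvStepA' PySem.Dict.empty,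
    pv_A_eq_counter, PySem.Dict.items_counter]
  simp only [PySem.List.dedup_eq_ofList, PySem.List.count_eq]
  rfl
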